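-- pv_equiv track=rewrite | github.com/mahesh989/cv-new | mt1/src/llm_keyword_matcher.py | _deduplicate_across_categories
-- ===== SOURCE A (Python) =====
-- from typing import Dict, List, Tuple, Optional, Set
--
-- def _deduplicate_across_categories(keywords_dict: Dict[str, List[str]]) -> Dict[str, List[str]]:
--     """
--     Remove duplicates across categories and ensure keywords are in most relevant category
--     """
--     # Priority order for categories (higher priority keeps the keyword)
--     category_priority = {
--         "technical_skills": 5,
--         "domain_keywords": 4,
--         "experience_keywords": 3,
--         "soft_skills": 2,
--         "education_keywords": 1
--     }
--
--     # Track all keywords and their best category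
--     keyword_to_category = {}
--
--     # First pass: assign each keyword to highest priority category
--     for category, keyword_list in keywords_dict.items():
--         for keyword in keyword_list:
--             keyword_lower = keyword.lower().strip()
--             if keyword_lower:
--                 current_priority = category_priority.get(category, 0)
--                 if keyword_lower not in keyword_to_category or current_priority > category_priority.get(keyword_to_category[keyword_lower][1], 0):
--                     keyword_to_category[keyword_lower] = (keyword, category)
--
--     # Second pass: rebuild categories with deduplicated keywords
--     deduplicated = {category: [] for category in keywords_dict.keys()}
--     for keyword_lower, (original_keyword, category) in keyword_to_category.items():
--         deduplicated[category].append(original_keyword)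
--
--     # Sort and limit keywords per category
--     for category in deduplicated:
--         deduplicated[category] = sorted(list(set(deduplicated[category])))[:20]  # Limit to 20 per category
--
--     return deduplicated
-- ===== SOURCE B (Python) =====
-- from typing import Dict, List
--
-- def _deduplicate_across_categories(keywords_dict: Dict[str, List[str]]) -> Dict[str, List[str]]:
--     """Group occurrences by lowered keyword, then pick each group's best category with max()."""
--     priority = {
--         "technical_skills": 5,
--         "domain_keywords": 4,
--         "experience_keywords": 3,
--         "soft_skills": 2,
--         "education_keywords": 1
--     }
--
--     # lowered keyword -> [(original keyword, category), ...] in encounter order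
--     occurrences = {}
--     for category, keyword_list in keywords_dict.items():
--         for keyword in keyword_list:
--             lowered = keyword.lower().strip()
--             if lowered:
--                 occurrences.setdefault(lowered, []).append((keyword, category))
--
--     result = {category: [] for category in keywords_dict}
--     for occ in occurrences.values():
--         keyword, category = max(occ, key=lambda kc: priority.get(kc[1], 0))
--         result[category].append(keyword)
--
--     return {category: sorted(set(kws))[:20] for category, kws in result.items()}
-- ===== Notes on version B (the rewrite author's own statement) =====
-- stated objective: alternative
-- what changed: Replaced A's running best-category dict (updated in place by a priority comparison on every occurrence) by a group-then-select pass: occurrences are first grouped by lowered keyword, then each group's winner is a single max() by category priority; Pre_ only excludes association lists with duplicate category keys, which a Python dict argument cannot produce.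
import Mathlib
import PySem

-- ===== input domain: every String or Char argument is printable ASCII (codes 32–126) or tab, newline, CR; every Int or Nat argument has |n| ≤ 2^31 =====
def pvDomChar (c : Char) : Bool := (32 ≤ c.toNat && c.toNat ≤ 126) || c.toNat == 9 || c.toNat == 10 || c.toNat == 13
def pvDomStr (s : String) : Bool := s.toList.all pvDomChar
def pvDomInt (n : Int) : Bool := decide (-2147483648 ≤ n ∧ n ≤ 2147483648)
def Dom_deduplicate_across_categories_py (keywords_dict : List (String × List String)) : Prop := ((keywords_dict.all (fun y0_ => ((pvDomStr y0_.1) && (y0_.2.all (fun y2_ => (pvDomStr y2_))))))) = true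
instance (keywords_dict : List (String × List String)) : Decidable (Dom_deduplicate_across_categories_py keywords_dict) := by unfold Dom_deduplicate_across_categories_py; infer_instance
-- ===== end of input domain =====

-- B replaces A's running best-category dict (updated by a priority comparison at every
-- occurrence) by a group-then-select pass: occurrences grouped by lowered keyword, then one
-- max() by category priority per group; alternative decomposition, same results.

-- ===== PORT A =====

-- the category_priority literal (shared by both ports: the same table appears in both sources)
def pvCatPriority : PySem.Dict String Int :=
  PySem.Dict.ofList [("technical_skills", 5), ("domain_keywords", 4), ("experience_keywords", 3),
                     ("soft_skills", 2), ("education_keywords", 1)]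

-- keyword.lower().strip()
def pvLow (kw : String) : String := PySem.Str.strip (PySem.Str.lower kw)

-- body of A's inner first-pass loop
def pvStepKw (category : String) (d : PySem.Dict String (String × String)) (keyword : String) :
    PySem.Dict String (String × String) :=
  let keyword_lower := pvLow keyword
  if keyword_lower ≠ "" then
    if !d.contains keyword_lower
        || pvCatPriority.getD category 0 > pvCatPriority.getD (d.getD keyword_lower ("", "")).2 0 then
      d.insert keyword_lower (keyword, category)
    else d
  else d

-- A's first pass
def pvFirstPass (keywords_dict : List (String × List String)) : PySem.Dict String (String × String) :=
  keywords_dict.foldl (fun d ck => ck.2.foldl (pvStepKw ck.1) d) PySem.Dict.empty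

def deduplicate_across_categories_py (keywords_dict : List (String × List String)) :
    List (String × List String) :=
  let keyword_to_category := pvFirstPass keywords_dict
  -- deduplicated = {category: [] for category in keywords_dict.keys()}
  let dedup0 := keywords_dict.foldl (fun d ck => d.insert ck.1 ([] : List String)) PySem.Dict.empty
  -- second pass: deduplicated[category].append(original_keyword)
  let dedup1 := keyword_to_category.items.foldl (fun d p => d.modify p.2.2 [] (· ++ [p.2.1])) dedup0
  -- deduplicated[category] = sorted(list(set(deduplicated[category])))[:20]
  (dedup1.items.map
    (fun p => (p.1, PySem.List.slice (PySem.List.sorted (PySem.Set.ofList p.2) (fun s => s)) none (some 20))))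

-- ===== PORT B =====

-- occurrences.setdefault(lowered, []).append((keyword, category))  (d[k] = d.get(k, []) + [x])
def pvOccStep (category : String) (d : PySem.Dict String (List (String × String)))
    (keyword : String) : PySem.Dict String (List (String × String)) :=
  let lowered := pvLow keyword
  if lowered ≠ "" then d.modify lowered [] (· ++ [(keyword, category)]) else d

-- keyword, category = max(occ, key=...); result[category].append(keyword)
def pvWinStep (d : PySem.Dict String (List String)) (occ : List (String × String)) :
    PySem.Dict String (List String) :=
  match PySem.List.max? occ (fun kc => pvCatPriority.getD kc.2 0) with
  | some w => d.modify w.2 [] (· ++ [w.1])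
  | none => d

def deduplicate_across_categories_py_alt (keywords_dict : List (String × List String)) :
    List (String × List String) :=
  let occurrences := keywords_dict.foldl (fun d ck => ck.2.foldl (pvOccStep ck.1) d) PySem.Dict.empty
  let result0 := keywords_dict.foldl (fun d ck => d.insert ck.1 ([] : List String)) PySem.Dict.empty
  let result := occurrences.values.foldl pvWinStep result0
  result.items.map
    (fun p => (p.1, PySem.List.slice (PySem.List.sorted (PySem.Set.ofList p.2) (fun s => s)) none (some 20)))

-- ===== PRECONDITION & SPEC =====
-- A's argument is a Python dict, whose keys are necessarily distinct; Pre_ only rules out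
-- association lists with duplicate keys, which no Python input can produce.
def Pre_deduplicate_across_categories_py (keywords_dict : List (String × List String)) : Prop :=
  (keywords_dict.map Prod.fst).Nodup

instance (keywords_dict : List (String × List String)) :
    Decidable (Pre_deduplicate_across_categories_py keywords_dict) := by
  unfold Pre_deduplicate_across_categories_py; infer_instance

def pvWitness_deduplicate_across_categories_py : (List (String × List String)) :=
  [("technical_skills", ["Py", "SQL", " py "]), ("soft_skills", ["sql", "Teamwork"])]

def Spec_deduplicate_across_categories_py (keywords_dict : List (String × List String)) (out : List (String × List String)) : Prop := out = deduplicate_across_categories_py_alt keywords_dict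
instance (keywords_dict : List (String × List String)) (out : List (String × List String)) : Decidable (Spec_deduplicate_across_categories_py keywords_dict out) := by unfold Spec_deduplicate_across_categories_py; infer_instance

-- ===== CLAIM (what is proved, stated in full; the proofs are below) =====
def Claim_equal_deduplicate_across_categories_py : Prop := ∀ (keywords_dict : List (String × List String)), Dom_deduplicate_across_categories_py keywords_dict → Pre_deduplicate_across_categories_py keywords_dict → Spec_deduplicate_across_categories_py keywords_dict (deduplicate_across_categories_py keywords_dict)

-- ===== LEMMAS AND PROOFS =====

-- ---- proof-side definitions ----
def pvPrio (category : String) : Int := pvCatPriority.getD category 0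

def pvStep2 (o : Option (String × String)) (e : String × String) : Option (String × String) :=
  match o with
  | none => some (e.2, e.1)
  | some kc => if pvPrio e.1 > pvPrio kc.2 then some (e.2, e.1) else o

def pvUpd (l : String) (o : Option (String × String)) (e : String × String) :
    Option (String × String) :=
  if pvLow e.2 = l then pvStep2 o e else o

def pvOccs (xs : List (String × List String)) : List (String × String) :=
  xs.flatMap (fun ck => ck.2.map (fun k => (ck.1, k)))

def pvW (l : String) (xs : List (String × List String)) : Option (String × String) :=
  (pvOccs xs).foldl (pvUpd l) none

def pvHits (l : String) (os : List (String × String)) : List (String × String) :=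
  os.filter (fun e => decide (pvLow e.2 = l))

def pvAassigned (xs : List (String × List String)) (c : String) : List String :=
  (((pvFirstPass xs).items.filter (fun p => p.2.2 == c)).map (fun p => p.2.1))

-- ---- A-side characterisation ----

lemma pvStepKw_get? (c : String) (d : PySem.Dict String (String × String)) (k l : String)
    (hl : l ≠ "") : (pvStepKw c d k).get? l = pvUpd l (d.get? l) (c, k) := by
  unfold pvStepKw pvUpd pvStep2
  by_cases h2 : pvLow k = l
  · rw [if_pos h2]
    rw [h2, if_pos hl, PySem.Dict.contains_eq_isSome_get?, PySem.Dict.getD_eq_get?_getD d l]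
    cases hget : d.get? l with
    | none => simp [PySem.Dict.get?_insert_self]
    | some kc =>
      simp only [Option.isSome_some, Bool.not_true, Bool.false_or, decide_eq_true_eq]
      simp only [Option.getD_some, pvPrio]
      by_cases hp : pvCatPriority.getD c 0 > pvCatPriority.getD kc.2 0
      · simp only [if_pos hp]
        exact PySem.Dict.get?_insert_self d l (k, c)
      · simp only [if_neg hp]
        exact hget
  · rw [if_neg h2]
    by_cases h1 : pvLow k = ""
    · rw [if_neg (by simp [h1])]
    · rw [if_pos h1]
      split
      · exact PySem.Dict.get?_insert_of_ne d _ (fun h => h2 h.symm)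
      · rfl

lemma pvFoldKws_get? (c : String) (l : String) (hl : l ≠ "") (kws : List String) :
    ∀ d : PySem.Dict String (String × String),
      (kws.foldl (pvStepKw c) d).get? l
        = (kws.map (fun k => (c, k))).foldl (pvUpd l) (d.get? l) := by
  induction kws with
  | nil => intro d; rfl
  | cons k t ih =>
    intro d
    simp only [List.foldl_cons, List.map_cons]
    rw [ih, pvStepKw_get? c d k l hl]

lemma pvFoldCats_get? (l : String) (hl : l ≠ "") (xs : List (String × List String)) :
    ∀ d : PySem.Dict String (String × String),
      (xs.foldl (fun d ck => ck.2.foldl (pvStepKw ck.1) d) d).get? l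
        = (pvOccs xs).foldl (pvUpd l) (d.get? l) := by
  induction xs with
  | nil => intro d; rfl
  | cons ck t ih =>
    intro d
    simp only [List.foldl_cons, pvOccs, List.flatMap_cons, List.foldl_append]
    rw [ih, pvFoldKws_get? ck.1 l hl ck.2 d]
    rfl

lemma pvFirstPass_get? (l : String) (hl : l ≠ "") (xs : List (String × List String)) :
    (pvFirstPass xs).get? l = pvW l xs := by
  unfold pvFirstPass pvW
  rw [pvFoldCats_get? l hl xs PySem.Dict.empty, PySem.Dict.get?_empty]

lemma pvW_eq_hits_foldl (l : String) (xs : List (String × List String)) :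
    pvW l xs = (pvHits l (pvOccs xs)).foldl pvStep2 none := by
  unfold pvW pvUpd pvHits
  rw [PySem.List.foldl_ite_eq_foldl_filter (fun e => pvLow e.2 = l) pvStep2 (pvOccs xs) none]

lemma pvQacc (hs : List (String × String)) :
    ∀ (kc kc' : String × String),
      hs.foldl pvStep2 (some kc) = some kc' ↔
        (kc' = kc ∧ ∀ e ∈ hs, pvPrio e.1 ≤ pvPrio kc.2) ∨
        (∃ u e v, hs = u ++ e :: v ∧ kc' = (e.2, e.1) ∧ pvPrio kc.2 < pvPrio e.1 ∧
          (∀ e' ∈ u, pvPrio e'.1 < pvPrio e.1) ∧ (∀ e' ∈ v, pvPrio e'.1 ≤ pvPrio e.1)) := by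
  induction hs with
  | nil =>
    intro kc kc'
    simp only [List.foldl_nil, Option.some_inj, List.not_mem_nil, false_implies, implies_true,
      and_true]
    constructor
    · intro h; exact Or.inl h.symm
    · rintro (h | ⟨u, e, v, h, _⟩)
      · exact h.symm
      · exact absurd h.symm (List.append_ne_nil_of_right_ne_nil _ (List.cons_ne_nil _ _))
  | cons e0 t ih =>
    intro kc kc'
    simp only [List.foldl_cons]
    by_cases hrep : pvPrio e0.1 > pvPrio kc.2
    · have : pvStep2 (some kc) e0 = some (e0.2, e0.1) := by simp [pvStep2, hrep]
      rw [this, ih]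
      constructor
      · rintro (⟨hkc', hall⟩ | ⟨u, e, v, ht, hkc', hgt, hu, hv⟩)
        · exact Or.inr ⟨[], e0, t, by simp, by simpa using hkc', hrep, by simp,
            by simpa using hall⟩
        · exact Or.inr ⟨e0 :: u, e, v, by simp [ht], hkc', lt_trans hrep hgt,
            by
              intro e' he'
              rcases List.mem_cons.mp he' with h | h
              · exact h ▸ hgt
              · exact hu e' h,
            hv⟩
      · rintro (⟨hkc', hall⟩ | ⟨u, e, v, ht, hkc', hgt, hu, hv⟩)
        · exact absurd (hall e0 (List.mem_cons_self)) (not_le.mpr hrep)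
        · cases u with
          | nil =>
            simp only [List.nil_append, List.cons.injEq] at ht
            refine Or.inl ⟨by rw [hkc', ht.1], ?_⟩
            intro e' he'
            have h2 := hv e' (ht.2 ▸ he')
            rw [ht.1]
            simpa using h2
          | cons u0 u' =>
            simp only [List.cons_append, List.cons.injEq] at ht
            refine Or.inr ⟨u', e, v, ht.2, hkc', ?_, fun e' h => hu e' (by simp [h]), hv⟩
            have := hu u0 (by simp)
            exact ht.1 ▸ this
    · have : pvStep2 (some kc) e0 = some kc := by simp [pvStep2, hrep]
      rw [this, ih]
      rw [not_lt] at hrep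
      constructor
      · rintro (⟨hkc', hall⟩ | ⟨u, e, v, ht, hkc', hgt, hu, hv⟩)
        · refine Or.inl ⟨hkc', ?_⟩
          intro e' he'
          rcases List.mem_cons.mp he' with h | h
          · exact h ▸ hrep
          · exact hall e' h
        · exact Or.inr ⟨e0 :: u, e, v, by simp [ht], hkc', hgt,
            by
              intro e' he'
              rcases List.mem_cons.mp he' with h | h
              · exact h ▸ lt_of_le_of_lt hrep hgt
              · exact hu e' h,
            hv⟩
      · rintro (⟨hkc', hall⟩ | ⟨u, e, v, ht, hkc', hgt, hu, hv⟩)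
        · exact Or.inl ⟨hkc', fun e' h => hall e' (List.mem_cons_of_mem _ h)⟩
        · cases u with
          | nil =>
            simp only [List.nil_append, List.cons.injEq] at ht
            exact absurd (ht.1 ▸ hgt) (not_lt.mpr (ht.1 ▸ hrep))
          | cons u0 u' =>
            simp only [List.cons_append, List.cons.injEq] at ht
            exact Or.inr ⟨u', e, v, ht.2, hkc', hgt, fun e' h => hu e' (by simp [h]), hv⟩

lemma pvQnone (hs : List (String × String)) (kc' : String × String) :
    hs.foldl pvStep2 none = some kc' ↔
      ∃ u e v, hs = u ++ e :: v ∧ kc' = (e.2, e.1) ∧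
        (∀ e' ∈ u, pvPrio e'.1 < pvPrio e.1) ∧ (∀ e' ∈ v, pvPrio e'.1 ≤ pvPrio e.1) := by
  cases hs with
  | nil =>
    simp only [List.foldl_nil]
    constructor
    · intro h; cases h
    · rintro ⟨u, e, v, h, _⟩
      exact absurd h.symm (List.append_ne_nil_of_right_ne_nil _ (List.cons_ne_nil _ _))
  | cons e0 t =>
    have : pvStep2 none e0 = some (e0.2, e0.1) := rfl
    rw [List.foldl_cons, this, pvQacc]
    constructor
    · rintro (⟨hkc', hall⟩ | ⟨u, e, v, ht, hkc', hgt, hu, hv⟩)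
      · exact ⟨[], e0, t, by simp, hkc', by simp, by simpa using hall⟩
      · exact ⟨e0 :: u, e, v, by simp [ht], hkc',
          by
            intro e' he'
            rcases List.mem_cons.mp he' with h | h
            · exact h ▸ hgt
            · exact hu e' h,
          hv⟩
    · rintro ⟨u, e, v, ht, hkc', hu, hv⟩
      cases u with
      | nil =>
        simp only [List.nil_append, List.cons.injEq] at ht
        exact Or.inl ⟨by rw [hkc', ht.1], fun e' h => ht.1 ▸ hv e' (ht.2 ▸ h)⟩
      | cons u0 u' =>
        simp only [List.cons_append, List.cons.injEq] at ht
        refine Or.inr ⟨u', e, v, ht.2, hkc', ht.1 ▸ hu u0 (by simp), 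
          fun e' h => hu e' (by simp [h]), hv⟩

def pvInv (S : List String) (d : PySem.Dict String (String × String)) : Prop :=
  d.keys.Nodup ∧ ∀ p ∈ d.items, pvLow p.2.1 = p.1 ∧ p.1 ≠ "" ∧ p.2.2 ∈ S

lemma pvStepKw_inv (S : List String) (c : String) (hc : c ∈ S)
    (d : PySem.Dict String (String × String)) (k : String) (h : pvInv S d) :
    pvInv S (pvStepKw c d k) := by
  unfold pvStepKw
  by_cases h1 : pvLow k ≠ ""
  · simp only [if_pos h1]
    split
    · refine ⟨PySem.Dict.nodup_keys_insert d _ _ h.1, ?_⟩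
      intro p hp
      rcases (PySem.Dict.mem_items_insert d _ _ p).mp hp with hp | hp
      · subst hp; exact ⟨rfl, h1, hc⟩
      · exact h.2 p hp.1
    · exact h
  · simp only [if_neg h1]; exact h

lemma pvFoldKws_inv (S : List String) (c : String) (hc : c ∈ S) (kws : List String) :
    ∀ d, pvInv S d → pvInv S (kws.foldl (pvStepKw c) d) := by
  induction kws with
  | nil => intro d h; exact h
  | cons k t ih => intro d h; rw [List.foldl_cons]; exact ih _ (pvStepKw_inv S c hc d k h)

lemma pvFoldCats_inv (S : List String) (ys : List (String × List String))
    (hS : ∀ ck ∈ ys, ck.1 ∈ S) :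
    ∀ d, pvInv S d → pvInv S (ys.foldl (fun d ck => ck.2.foldl (pvStepKw ck.1) d) d) := by
  induction ys with
  | nil => intro d h; exact h
  | cons ck t ih =>
    intro d h
    rw [List.foldl_cons]
    exact ih (fun x hx => hS x (List.mem_cons_of_mem _ hx)) _
      (pvFoldKws_inv S ck.1 (hS ck List.mem_cons_self) ck.2 d h)

lemma pvFirstPass_inv (xs : List (String × List String)) :
    pvInv (xs.map Prod.fst) (pvFirstPass xs) := by
  unfold pvFirstPass
  refine pvFoldCats_inv _ xs (fun ck hck => List.mem_map_of_mem hck) _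
    ⟨PySem.Dict.nodup_keys_empty, ?_⟩
  intro p hp
  simp [PySem.Dict.empty] at hp

lemma pvMemAassigned (xs : List (String × List String)) (c x : String) :
    x ∈ pvAassigned xs c ↔ pvLow x ≠ "" ∧ pvW (pvLow x) xs = some (x, c) := by
  obtain ⟨hnd, hinv⟩ := pvFirstPass_inv xs
  unfold pvAassigned
  simp only [List.mem_map, List.mem_filter, beq_iff_eq]
  constructor
  · rintro ⟨p, ⟨hp, hpc⟩, hx⟩
    obtain ⟨hlow, hne, -⟩ := hinv p hp
    have hget : (pvFirstPass xs).get? p.1 = some p.2 :=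
      (PySem.Dict.get?_eq_some_iff_mem_items _ _ _ hnd).mpr (by exact hp)
    rw [pvFirstPass_get? p.1 hne xs] at hget
    have hp2 : p.2 = (x, c) := by
      cases hp2 : p.2
      rw [hp2] at hx hpc
      simp only [Prod.mk.injEq]
      exact ⟨hx, hpc⟩
    rw [hx] at hlow
    refine ⟨by rw [hlow]; exact hne, ?_⟩
    rw [hlow, ← hp2]
    exact hget
  · rintro ⟨hne, hW⟩
    have hget : (pvFirstPass xs).get? (pvLow x) = some (x, c) := by
      rw [pvFirstPass_get? _ hne xs]; exact hW
    have hp : (pvLow x, (x, c)) ∈ (pvFirstPass xs).items :=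
      (PySem.Dict.get?_eq_some_iff_mem_items _ _ _ hnd).mp hget
    exact ⟨(pvLow x, (x, c)), ⟨hp, rfl⟩, rfl⟩

lemma pvMem_hits_occs (l : String) (E : List (String × List String)) (e : String × String) :
    e ∈ pvHits l (pvOccs E) ↔ (∃ ck ∈ E, e.1 = ck.1 ∧ e.2 ∈ ck.2) ∧ pvLow e.2 = l := by
  simp only [pvHits, pvOccs, List.mem_filter, List.mem_flatMap, List.mem_map,
    decide_eq_true_eq]
  constructor
  · rintro ⟨⟨ck, hck, k, hk, rfl⟩, hl⟩
    exact ⟨⟨ck, hck, rfl, hk⟩, hl⟩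
  · rintro ⟨⟨ck, hck, h1, h2⟩, hl⟩
    exact ⟨⟨ck, hck, e.2, h2, by rw [← h1]⟩, hl⟩

lemma pvSorted_eq_of_same_mem (A B : List String) (hA : A.Nodup) (hB : B.Nodup)
    (h : ∀ y, y ∈ A ↔ y ∈ B) :
    PySem.List.sorted A (fun s => s) = PySem.List.sorted B (fun s => s) := by
  have hperm : (PySem.List.sorted B (fun s => s)).Perm B := PySem.List.sorted_perm B _ false
  have hysnd : (PySem.List.sorted B (fun s => s)).Nodup := hperm.nodup_iff.mpr hB
  have hle : (PySem.List.sorted B (fun s => s)).Pairwise (fun a b => a ≤ b) :=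
    PySem.List.sorted_pairwise B (fun s => s)
  have hlt : (PySem.List.sorted B (fun s => s)).Pairwise (fun a b => a < b) := by
    have := hle.and hysnd
    exact this.imp (fun hab => lt_of_le_of_ne hab.1 hab.2)
  refine PySem.List.sorted_eq_of_perm_of_pairwise_lt A _ (fun s => s) ?_ hlt
  exact hperm.trans ((List.perm_ext_iff_of_nodup hB hA).mpr (fun a => (h a).symm))

lemma pvA_shape (xs : List (String × List String)) (hnd : (xs.map Prod.fst).Nodup) :
    deduplicate_across_categories_py xs
      = xs.map (fun ck => (ck.1,
          PySem.List.slice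
            (PySem.List.sorted (PySem.Set.ofList (pvAassigned xs ck.1)) (fun s => s))
            none (some 20))) := by
  obtain ⟨-, hinv⟩ := pvFirstPass_inv xs
  simp only [deduplicate_across_categories_py]
  set items := (pvFirstPass xs).items with hitems
  set dedup0 := xs.foldl (fun d ck => d.insert ck.1 ([] : List String)) PySem.Dict.empty
    with hdedup0
  have h0 : dedup0.items = xs.map (fun a => (a.1, ([] : List String))) := by
    rw [hdedup0]
    rw [PySem.Dict.items_foldl_insert_fresh xs Prod.fst (fun _ => []) PySem.Dict.empty
      (fun a _ => PySem.Dict.contains_empty a.1) hnd]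
    rfl
  have h0k : dedup0.keys = xs.map Prod.fst := by
    show dedup0.items.map Prod.fst = _
    rw [h0, List.map_map]
    rfl
  set dedup1 := items.foldl (fun d p => d.modify p.2.2 [] (· ++ [p.2.1])) dedup0 with hdedup1
  have hfold : dedup1 = (items.map (fun p => (p.2.2, p.2.1))).foldl
      (fun d q => d.modify q.1 [] (· ++ [q.2])) dedup0 := by
    rw [hdedup1, List.foldl_map]
  have hk1 : dedup1.keys = dedup0.keys := by
    rw [hfold]
    rw [PySem.Dict.keys_foldl_modify_key _ Prod.fst [] (fun _ q => (· ++ [q.2])) dedup0]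
    rw [PySem.Set.update_eq_append_filter]
    have : (PySem.Set.ofList ((items.map (fun p => (p.2.2, p.2.1))).map Prod.fst)).filter
        (fun y => !PySem.Set.contains dedup0.keys y) = [] := by
      rw [List.filter_eq_nil_iff]
      intro y hy
      rw [PySem.Set.mem_ofList, List.map_map, List.mem_map] at hy
      obtain ⟨p, hp, hpy⟩ := hy
      have : p.2.2 ∈ xs.map Prod.fst := (hinv p hp).2.2
      have hmem : y ∈ dedup0.keys := by rw [h0k, ← hpy]; exact this
      simpa [PySem.Set.contains_eq_listContains] using hmem
    rw [this, List.append_nil]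
  have hnd1 : dedup1.keys.Nodup := by rw [hk1, h0k]; exact hnd
  have hgetD : ∀ c ∈ xs.map Prod.fst, dedup1.getD c [] = pvAassigned xs c := by
    intro c hc
    rw [hfold, PySem.Dict.getD_foldl_modify_append]
    have hd0 : dedup0.getD c [] = [] := by
      obtain ⟨ck, hck, rfl⟩ := List.mem_map.mp hc
      refine PySem.Dict.getD_of_mem_items dedup0 ?_ (by rw [h0k]; exact hnd) []
      rw [h0]
      exact List.mem_map.mpr ⟨ck, hck, rfl⟩
    rw [hd0, List.nil_append, List.filter_map, List.map_map]
    unfold pvAassigned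
    rw [← hitems]
    simp only [Function.comp_def]
  have hitems1 : dedup1.items = xs.map (fun ck => (ck.1, pvAassigned xs ck.1)) := by
    rw [PySem.Dict.items_eq_map_keys dedup1 hnd1 [], hk1, h0k, List.map_map]
    apply List.map_congr_left
    intro ck hck
    show (ck.1, dedup1.getD ck.1 []) = (ck.1, pvAassigned xs ck.1)
    rw [hgetD ck.1 (List.mem_map_of_mem hck)]
  rw [hitems1, List.map_map]
  rfl

-- ---- B-side characterisation ----

def pvOccDict (xs : List (String × List String)) : PySem.Dict String (List (String × String)) :=
  xs.foldl (fun d ck => ck.2.foldl (pvOccStep ck.1) d) PySem.Dict.empty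

lemma pvHits_append (l : String) (os1 os2 : List (String × String)) :
    pvHits l (os1 ++ os2) = pvHits l os1 ++ pvHits l os2 := by
  unfold pvHits; rw [List.filter_append]

lemma pvHits_block (l c : String) (kws : List String) :
    pvHits l (kws.map (fun k => (c, k)))
      = (kws.filter (fun y => decide (pvLow y = l))).map (fun k => (c, k)) := by
  unfold pvHits
  rw [List.filter_map]
  simp only [Function.comp_def]

lemma pvOccStep_getD (l : String) (hl : l ≠ "") (c : String)
    (d : PySem.Dict String (List (String × String))) (k : String) :
    (pvOccStep c d k).getD l []
      = d.getD l [] ++ (if pvLow k = l then [(k, c)] else []) := by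
  unfold pvOccStep
  by_cases h1 : pvLow k ≠ ""
  · rw [if_pos h1, PySem.Dict.getD_modify]
    by_cases h2 : l = pvLow k
    · rw [if_pos h2, if_pos h2.symm, h2]
    · rw [if_neg h2, if_neg (fun hh => h2 hh.symm), List.append_nil]
  · rw [if_neg h1]
    push_neg at h1
    rw [if_neg (by rw [h1]; exact fun hh => hl hh.symm), List.append_nil]

lemma pvFoldKws_occ_getD (l : String) (hl : l ≠ "") (c : String) (kws : List String) :
    ∀ d : PySem.Dict String (List (String × String)),
      (kws.foldl (pvOccStep c) d).getD l []
        = d.getD l [] ++ (kws.filter (fun y => decide (pvLow y = l))).map (fun k => (k, c)) := by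
  induction kws with
  | nil => intro d; simp
  | cons k t ih =>
    intro d
    rw [List.foldl_cons, ih, pvOccStep_getD l hl c d k, List.filter_cons]
    by_cases h : pvLow k = l
    · simp [h, List.append_assoc]
    · simp [h]

lemma pvOccFold_getD (l : String) (hl : l ≠ "") (xs : List (String × List String)) :
    ∀ d : PySem.Dict String (List (String × String)),
      (xs.foldl (fun d ck => ck.2.foldl (pvOccStep ck.1) d) d).getD l []
        = d.getD l [] ++ (pvHits l (pvOccs xs)).map (fun e => (e.2, e.1)) := by
  induction xs with
  | nil => intro d; simp [pvOccs, pvHits]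
  | cons ck t ih =>
    intro d
    rw [List.foldl_cons, ih, pvFoldKws_occ_getD l hl ck.1 ck.2 d]
    have hocc : pvOccs (ck :: t) = ck.2.map (fun k => (ck.1, k)) ++ pvOccs t := by
      simp [pvOccs]
    rw [hocc, pvHits_append, List.map_append, pvHits_block, List.map_map]
    simp only [Function.comp_def, List.append_assoc]

lemma pvOccAt (xs : List (String × List String)) (l : String) (hl : l ≠ "") :
    (pvOccDict xs).getD l [] = (pvHits l (pvOccs xs)).map (fun e => (e.2, e.1)) := by
  unfold pvOccDict
  rw [pvOccFold_getD l hl xs PySem.Dict.empty, PySem.Dict.getD_empty, List.nil_append]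

lemma pvOccStep_contains (c : String) (d : PySem.Dict String (List (String × String)))
    (k l : String) :
    ((pvOccStep c d k).contains l = true)
      ↔ (d.contains l = true ∨ (pvLow k ≠ "" ∧ pvLow k = l)) := by
  unfold pvOccStep
  by_cases h1 : pvLow k ≠ ""
  · rw [if_pos h1, PySem.Dict.contains_modify]
    simp only [Bool.or_eq_true, beq_iff_eq]
    constructor
    · rintro (h | h)
      · exact Or.inr ⟨h1, h.symm⟩
      · exact Or.inl h
    · rintro (h | ⟨-, h⟩)
      · exact Or.inr h
      · exact Or.inl h.symm
  · rw [if_neg h1]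
    simp [h1]

lemma pvFoldKws_contains (c : String) (kws : List String) (l : String) :
    ∀ d : PySem.Dict String (List (String × String)),
      ((kws.foldl (pvOccStep c) d).contains l = true)
        ↔ (d.contains l = true ∨ ∃ k ∈ kws, pvLow k ≠ "" ∧ pvLow k = l) := by
  induction kws with
  | nil => intro d; simp
  | cons k t ih =>
    intro d
    rw [List.foldl_cons, ih, pvOccStep_contains]
    constructor
    · rintro ((h | h) | ⟨k', hk', hp⟩)
      · exact Or.inl h
      · exact Or.inr ⟨k, List.mem_cons_self, h⟩
      · exact Or.inr ⟨k', List.mem_cons_of_mem _ hk', hp⟩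
    · rintro (h | ⟨k', hk', hp⟩)
      · exact Or.inl (Or.inl h)
      · rcases List.mem_cons.mp hk' with heq | hm
        · exact Or.inl (Or.inr (heq ▸ hp))
        · exact Or.inr ⟨k', hm, hp⟩

lemma pvOccFold_contains (xs : List (String × List String)) (l : String) :
    ∀ d : PySem.Dict String (List (String × String)),
      ((xs.foldl (fun d ck => ck.2.foldl (pvOccStep ck.1) d) d).contains l = true)
        ↔ (d.contains l = true ∨ ∃ e ∈ pvOccs xs, pvLow e.2 ≠ "" ∧ pvLow e.2 = l) := by
  induction xs with
  | nil => intro d; simp [pvOccs]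
  | cons ck t ih =>
    intro d
    have hocc : pvOccs (ck :: t) = ck.2.map (fun k => (ck.1, k)) ++ pvOccs t := by
      simp [pvOccs]
    rw [List.foldl_cons, ih, pvFoldKws_contains, hocc]
    constructor
    · rintro ((h | ⟨k, hk, hp⟩) | ⟨e, he, hp⟩)
      · exact Or.inl h
      · exact Or.inr ⟨(ck.1, k), List.mem_append_left _ (List.mem_map_of_mem hk), hp⟩
      · exact Or.inr ⟨e, List.mem_append_right _ he, hp⟩
    · rintro (h | ⟨e, he, hp⟩)
      · exact Or.inl (Or.inl h)
      · rcases List.mem_append.mp he with hm | hm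
        · obtain ⟨k, hk, rfl⟩ := List.mem_map.mp hm
          exact Or.inl (Or.inr ⟨k, hk, hp⟩)
        · exact Or.inr ⟨e, hm, hp⟩

lemma pvMem_occKeys (xs : List (String × List String)) (l : String) :
    l ∈ (pvOccDict xs).keys ↔ ∃ e ∈ pvOccs xs, pvLow e.2 ≠ "" ∧ pvLow e.2 = l := by
  rw [← PySem.Dict.contains_iff_mem_keys]
  unfold pvOccDict
  rw [pvOccFold_contains xs l PySem.Dict.empty]
  simp [PySem.Dict.contains_empty]

lemma pvOccStep_nodup (c : String) (d : PySem.Dict String (List (String × String)))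
    (k : String) (h : d.keys.Nodup) : (pvOccStep c d k).keys.Nodup := by
  unfold pvOccStep
  by_cases h1 : pvLow k ≠ ""
  · rw [if_pos h1, PySem.Dict.keys_modify]
    exact PySem.Dict.nodup_keys_insert d _ _ h
  · rw [if_neg h1]; exact h

lemma pvFoldKws_occ_nodup (c : String) (kws : List String) :
    ∀ d : PySem.Dict String (List (String × String)),
      d.keys.Nodup → (kws.foldl (pvOccStep c) d).keys.Nodup := by
  induction kws with
  | nil => intro d h; exact h
  | cons k t ih =>
    intro d h
    rw [List.foldl_cons]
    exact ih _ (pvOccStep_nodup c d k h)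

lemma pvOccDict_keys_nodup (xs : List (String × List String)) :
    (pvOccDict xs).keys.Nodup := by
  unfold pvOccDict
  have hgen : ∀ (ys : List (String × List String))
      (d : PySem.Dict String (List (String × String))), d.keys.Nodup →
      (ys.foldl (fun d ck => ck.2.foldl (pvOccStep ck.1) d) d).keys.Nodup := by
    intro ys
    induction ys with
    | nil => intro d h; exact h
    | cons ck t ih =>
      intro d h
      rw [List.foldl_cons]
      exact ih _ (pvFoldKws_occ_nodup ck.1 ck.2 d h)
  exact hgen xs PySem.Dict.empty (by rw [PySem.Dict.keys_empty]; exact List.nodup_nil)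

lemma pvOccKeys_ne (xs : List (String × List String)) (l : String)
    (h : l ∈ (pvOccDict xs).keys) : l ≠ "" := by
  obtain ⟨e, -, hne, hl⟩ := (pvMem_occKeys xs l).mp h
  rw [← hl]
  exact hne

lemma pvMaxFold (hs : List (String × String)) :
    ∀ o : Option (String × String),
      (hs.map (fun e => (e.2, e.1))).foldl
          (fun acc x => match acc with
            | none => some x
            | some m => if (fun kc : String × String => pvCatPriority.getD kc.2 0) m
                            < (fun kc : String × String => pvCatPriority.getD kc.2 0) x then some x
                        else some m)
          o
        = hs.foldl pvStep2 o := by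
  induction hs with
  | nil => intro o; rfl
  | cons e t ih =>
    intro o
    simp only [List.map_cons, List.foldl_cons]
    rw [ih]
    congr 1
    cases o with
    | none => rfl
    | some m =>
      show (if pvCatPriority.getD m.2 0 < pvCatPriority.getD e.1 0 then some (e.2, e.1)
            else some m) = pvStep2 (some m) e
      unfold pvStep2 pvPrio
      rfl

lemma pvMax_eq_pvW (xs : List (String × List String)) (l : String) (hl : l ≠ "") :
    PySem.List.max? ((pvOccDict xs).getD l []) (fun kc => pvCatPriority.getD kc.2 0)
      = pvW l xs := by
  rw [pvOccAt xs l hl, pvW_eq_hits_foldl, ← pvMaxFold (pvHits l (pvOccs xs)) none]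
  unfold PySem.List.max?
  apply PySem.List.foldl_congr_mem
  intro acc x _
  cases acc <;> rfl

lemma pvW_some_of_key (xs : List (String × List String)) (l : String)
    (h : l ∈ (pvOccDict xs).keys) : ∃ w, pvW l xs = some w := by
  have hl := pvOccKeys_ne xs l h
  obtain ⟨e, he, hne, hel⟩ := (pvMem_occKeys xs l).mp h
  have hmem : e ∈ pvHits l (pvOccs xs) := by
    unfold pvHits
    rw [List.mem_filter]
    exact ⟨he, by simpa using hel⟩
  have hnonempty : (pvOccDict xs).getD l [] ≠ [] := by
    rw [pvOccAt xs l hl]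
    intro hc
    rw [List.map_eq_nil_iff] at hc
    rw [hc] at hmem
    exact List.not_mem_nil hmem
  cases hmax : PySem.List.max? ((pvOccDict xs).getD l [])
      (fun kc => pvCatPriority.getD kc.2 0) with
  | none => exact absurd ((PySem.List.max?_eq_none_iff _ _).mp hmax) hnonempty
  | some w =>
    rw [pvMax_eq_pvW xs l hl] at hmax
    exact ⟨w, hmax⟩

lemma pvW_some_shape (xs : List (String × List String)) (l x c : String)
    (h : pvW l xs = some (x, c)) : pvLow x = l ∧ c ∈ xs.map Prod.fst := by
  rw [pvW_eq_hits_foldl, pvQnone] at h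
  obtain ⟨u, e, v, hsp, hkc, -, -⟩ := h
  have hx : x = e.2 := congrArg Prod.fst hkc
  have hc : c = e.1 := congrArg Prod.snd hkc
  have he : e ∈ pvHits l (pvOccs xs) := by
    rw [hsp]
    exact List.mem_append_right _ (List.mem_cons_self)
  obtain ⟨⟨ck, hck, h1, h2⟩, h3⟩ := (pvMem_hits_occs l xs e).mp he
  constructor
  · rw [hx]; exact h3
  · rw [hc, h1]; exact List.mem_map_of_mem hck

-- winner of a key, and B's winner pairs
def pvWk (xs : List (String × List String)) (k : String) : String × String :=
  (pvW k xs).getD ("", "")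

def pvWinPairs (xs : List (String × List String)) : List (String × String) :=
  ((pvOccDict xs).keys).map (fun k => ((pvWk xs k).2, (pvWk xs k).1))

def pvBassigned (xs : List (String × List String)) (c : String) : List String :=
  ((pvWinPairs xs).filter (fun p => p.1 == c)).map (·.2)

lemma pvWinFold (xs : List (String × List String)) (r0 : PySem.Dict String (List String)) :
    (pvOccDict xs).values.foldl pvWinStep r0
      = (pvWinPairs xs).foldl (fun d p => d.modify p.1 [] (· ++ [p.2])) r0 := by
  rw [PySem.Dict.values_eq_map_keys (pvOccDict xs) (pvOccDict_keys_nodup xs) []]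
  rw [List.foldl_map]
  unfold pvWinPairs
  rw [List.foldl_map]
  apply PySem.List.foldl_congr_mem
  intro d k hk
  have hl := pvOccKeys_ne xs k hk
  obtain ⟨w, hw⟩ := pvW_some_of_key xs k hk
  unfold pvWinStep
  rw [pvMax_eq_pvW xs k hl, hw]
  have hwk : pvWk xs k = w := by unfold pvWk; rw [hw]; rfl
  rw [hwk]

lemma pvMemBassigned (xs : List (String × List String)) (c x : String) :
    x ∈ pvBassigned xs c ↔ pvLow x ≠ "" ∧ pvW (pvLow x) xs = some (x, c) := by
  unfold pvBassigned pvWinPairs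
  simp only [List.filter_map, List.map_map, List.mem_map, List.mem_filter,
    Function.comp_def, beq_iff_eq]
  constructor
  · rintro ⟨k, ⟨hk, hc⟩, hx⟩
    obtain ⟨w, hw⟩ := pvW_some_of_key xs k hk
    have hwk : pvWk xs k = w := by unfold pvWk; rw [hw]; rfl
    have hwxc : w = (x, c) := by
      cases hweq : w
      rw [hweq] at hwk
      rw [hwk] at hx hc
      simp only [Prod.mk.injEq]
      exact ⟨hx, hc⟩
    rw [hwxc] at hw
    obtain ⟨hlow, -⟩ := pvW_some_shape xs k x c hw
    subst hlow
    exact ⟨pvOccKeys_ne xs _ hk, hw⟩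
  · rintro ⟨hne, hW⟩
    have hk : pvLow x ∈ (pvOccDict xs).keys := by
      rw [pvW_eq_hits_foldl, pvQnone] at hW
      obtain ⟨u, e, v, hsp, hkc, -, -⟩ := hW
      have he : e ∈ pvHits (pvLow x) (pvOccs xs) := by
        rw [hsp]; exact List.mem_append_right _ (List.mem_cons_self)
      obtain ⟨⟨ck, hck, -, -⟩, h3⟩ := (pvMem_hits_occs _ xs e).mp he
      rw [pvMem_occKeys]
      refine ⟨e, ?_, by rw [h3]; exact hne, h3⟩
      simp only [pvHits, List.mem_filter] at he
      exact he.1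
    have hwk : pvWk xs (pvLow x) = (x, c) := by unfold pvWk; rw [hW]; rfl
    exact ⟨pvLow x, ⟨hk, by rw [hwk]⟩, by rw [hwk]⟩

lemma pvB_shape (xs : List (String × List String)) (hnd : (xs.map Prod.fst).Nodup) :
    deduplicate_across_categories_py_alt xs
      = xs.map (fun ck => (ck.1,
          PySem.List.slice
            (PySem.List.sorted (PySem.Set.ofList (pvBassigned xs ck.1)) (fun s => s))
            none (some 20))) := by
  simp only [deduplicate_across_categories_py_alt]
  have hocc : xs.foldl (fun d ck => ck.2.foldl (pvOccStep ck.1) d) PySem.Dict.empty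
      = pvOccDict xs := rfl
  rw [hocc]
  set result0 := xs.foldl (fun d ck => d.insert ck.1 ([] : List String)) PySem.Dict.empty
    with hresult0
  have h0 : result0.items = xs.map (fun a => (a.1, ([] : List String))) := by
    rw [hresult0]
    rw [PySem.Dict.items_foldl_insert_fresh xs Prod.fst (fun _ => []) PySem.Dict.empty
      (fun a _ => PySem.Dict.contains_empty a.1) hnd]
    rfl
  have h0k : result0.keys = xs.map Prod.fst := by
    show result0.items.map Prod.fst = _
    rw [h0, List.map_map]
    rfl
  have hfold : (pvOccDict xs).values.foldl pvWinStep result0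
      = (pvWinPairs xs).foldl (fun d p => d.modify p.1 [] (· ++ [p.2])) result0 :=
    pvWinFold xs result0
  set result := (pvWinPairs xs).foldl (fun d p => d.modify p.1 [] (· ++ [p.2])) result0
    with hresult
  have hk1 : result.keys = result0.keys := by
    rw [hresult]
    rw [PySem.Dict.keys_foldl_modify_key _ Prod.fst [] (fun _ q => (· ++ [q.2])) result0]
    rw [PySem.Set.update_eq_append_filter]
    have hnil : (PySem.Set.ofList ((pvWinPairs xs).map Prod.fst)).filter
        (fun y => !PySem.Set.contains result0.keys y) = [] := by
      rw [List.filter_eq_nil_iff]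
      intro y hy
      rw [PySem.Set.mem_ofList, List.mem_map] at hy
      obtain ⟨p, hp, hpy⟩ := hy
      unfold pvWinPairs at hp
      rw [List.mem_map] at hp
      obtain ⟨k, hk, hkp⟩ := hp
      obtain ⟨w, hw⟩ := pvW_some_of_key xs k hk
      have hwk : pvWk xs k = w := by unfold pvWk; rw [hw]; rfl
      have hy2 : y = w.2 := by rw [← hpy, ← hkp, hwk]
      obtain ⟨-, hcat⟩ := pvW_some_shape xs k w.1 w.2 (by rw [hw])
      have hmem : y ∈ result0.keys := by rw [h0k, hy2]; exact hcat
      simpa [PySem.Set.contains_eq_listContains] using hmem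
    rw [hnil, List.append_nil]
  have hnd1 : result.keys.Nodup := by rw [hk1, h0k]; exact hnd
  have hgetD : ∀ c ∈ xs.map Prod.fst, result.getD c [] = pvBassigned xs c := by
    intro c hc
    rw [hresult, PySem.Dict.getD_foldl_modify_append]
    have hd0 : result0.getD c [] = [] := by
      obtain ⟨ck, hck, rfl⟩ := List.mem_map.mp hc
      refine PySem.Dict.getD_of_mem_items result0 ?_ (by rw [h0k]; exact hnd) []
      rw [h0]
      exact List.mem_map.mpr ⟨ck, hck, rfl⟩
    rw [hd0, List.nil_append]
    rfl
  have hitems1 : result.items = xs.map (fun ck => (ck.1, pvBassigned xs ck.1)) := by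
    rw [PySem.Dict.items_eq_map_keys result hnd1 [], hk1, h0k, List.map_map]
    apply List.map_congr_left
    intro ck hck
    show (ck.1, result.getD ck.1 []) = (ck.1, pvBassigned xs ck.1)
    rw [hgetD ck.1 (List.mem_map_of_mem hck)]
  rw [hfold, hitems1, List.map_map]
  rfl

theorem pv_main (xs : List (String × List String)) (hnd : (xs.map Prod.fst).Nodup) :
    deduplicate_across_categories_py xs = deduplicate_across_categories_py_alt xs := by
  rw [pvA_shape xs hnd, pvB_shape xs hnd]
  apply List.map_congr_left
  intro ck hck
  have hset : PySem.List.sorted (PySem.Set.ofList (pvAassigned xs ck.1)) (fun s => s)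
      = PySem.List.sorted (PySem.Set.ofList (pvBassigned xs ck.1)) (fun s => s) := by
    apply pvSorted_eq_of_same_mem _ _ (PySem.Set.nodup_ofList _) (PySem.Set.nodup_ofList _)
    intro y
    rw [PySem.Set.mem_ofList, PySem.Set.mem_ofList, pvMemAassigned, pvMemBassigned]
  rw [hset]

-- ===== VERDICT (by name: the statement is the Claim_ definition above) =====
theorem deduplicate_across_categories_py_spec : Claim_equal_deduplicate_across_categories_py := by
  intro keywords_dict _hdom hpre
  unfold Spec_deduplicate_across_categories_py
  unfold Pre_deduplicate_across_categories_py at hpre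
  exact pv_main keywords_dict hpre
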